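-- pv_equiv track=rewrite | github.com/Ncode320/Lights-out | main.py | pos_to_tile
-- ===== SOURCE A (Python) =====
-- def pos_to_tile(posX:int, posY:int) -> tuple[int]:
--     if posX < 50 or 340 < posX: return (-1, -1)
--     if posY < 50 or 340 < posY: return (-1, -1)
--
--     for i in range(5):
--         for j in range(5):
--             if ( 50+(60*i) < posX and posX < 100+(60*i) ) and ( 50+(60*j) < posY and posY < 100+(60*j) ):
--                 return (i, j)
--
--     return (-1, -1)
-- ===== SOURCE B (Python) =====
-- def pos_to_tile(posX: int, posY: int) -> tuple[int]:
--     if posX < 50 or 340 < posX: return (-1, -1)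
--     if posY < 50 or 340 < posY: return (-1, -1)
--     i, rx = divmod(posX - 50, 60)
--     j, ry = divmod(posY - 50, 60)
--     if 0 < rx < 50 and 0 < ry < 50:
--         return (i, j)
--     return (-1, -1)
-- ===== Notes on version B (the rewrite author's own statement) =====
-- stated objective: simpler
-- what changed: Replaces the fixed 5x5 nested scan over all tiles with a direct divmod-based index computation (tile index = offset//60, in-tile check via offset%60).
import Mathlib
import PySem

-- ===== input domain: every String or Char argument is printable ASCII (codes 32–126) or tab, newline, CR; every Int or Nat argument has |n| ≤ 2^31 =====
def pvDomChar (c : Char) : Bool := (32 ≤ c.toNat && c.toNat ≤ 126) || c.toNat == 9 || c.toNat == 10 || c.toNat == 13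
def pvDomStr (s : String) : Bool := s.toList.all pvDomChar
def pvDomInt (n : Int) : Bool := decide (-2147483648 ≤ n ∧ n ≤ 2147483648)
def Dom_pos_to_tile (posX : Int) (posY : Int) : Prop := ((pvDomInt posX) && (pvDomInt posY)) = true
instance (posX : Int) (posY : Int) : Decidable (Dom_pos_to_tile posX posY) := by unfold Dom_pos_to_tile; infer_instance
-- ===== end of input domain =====

-- B replaces A's fixed 5x5 nested tile scan by a direct divmod-based index computation (simpler).

-- ===== PORT A =====
-- A: range guards, then a 5x5 double loop returning the first (i, j) whose open tile interval contains (posX, posY).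
def pos_to_tile (posX : Int) (posY : Int) : List Int :=
  if posX < 50 ∨ 340 < posX then [-1, -1]
  else if posY < 50 ∨ 340 < posY then [-1, -1]
  else
    match (PySem.List.pyRange 0 5 1).findSome? (fun i =>
      (PySem.List.pyRange 0 5 1).findSome? (fun j =>
        if (50 + 60 * i < posX ∧ posX < 100 + 60 * i) ∧ (50 + 60 * j < posY ∧ posY < 100 + 60 * j)
        then some [i, j] else none)) with
    | some r => r
    | none => [-1, -1]

-- ===== PORT B =====
-- B: same guards, then i, rx = divmod(posX-50, 60); j, ry = divmod(posY-50, 60); in-tile iff 0 < rx < 50 and 0 < ry < 50.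
def pos_to_tile_alt (posX : Int) (posY : Int) : List Int :=
  if posX < 50 ∨ 340 < posX then [-1, -1]
  else if posY < 50 ∨ 340 < posY then [-1, -1]
  else
    let i := PySem.Int.floordiv (posX - 50) 60
    let rx := PySem.Int.mod (posX - 50) 60
    let j := PySem.Int.floordiv (posY - 50) 60
    let ry := PySem.Int.mod (posY - 50) 60
    if (0 < rx ∧ rx < 50) ∧ (0 < ry ∧ ry < 50) then [i, j] else [-1, -1]

-- ===== PRECONDITION & SPEC =====
def Spec_pos_to_tile (posX : Int) (posY : Int) (out : List Int) : Prop := out = pos_to_tile_alt posX posY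
instance (posX : Int) (posY : Int) (out : List Int) : Decidable (Spec_pos_to_tile posX posY out) := by unfold Spec_pos_to_tile; infer_instance

-- ===== CLAIM (what is proved, stated in full; the proofs are below) =====
def Claim_equal_pos_to_tile : Prop := ∀ (posX : Int) (posY : Int), Dom_pos_to_tile posX posY → Spec_pos_to_tile posX posY (pos_to_tile posX posY)

-- ===== LEMMAS AND PROOFS =====

-- the inner (j) loop of A, for a fixed row i
def rowF (X Y i : Int) : Option (List Int) :=
  ([0, 1, 2, 3, 4] : List Int).findSome? (fun j =>
    if (50 + 60 * i < X ∧ X < 100 + 60 * i) ∧ (50 + 60 * j < Y ∧ Y < 100 + 60 * j)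
    then some [i, j] else none)

-- the inner loop with the (already true) x-condition dropped
def colF (Y i : Int) : Option (List Int) :=
  ([0, 1, 2, 3, 4] : List Int).findSome? (fun j =>
    if 50 + 60 * j < Y ∧ Y < 100 + 60 * j then some [i, j] else none)

lemma rowF_neg (X Y i : Int) (h : ¬(50 + 60 * i < X ∧ X < 100 + 60 * i)) : rowF X Y i = none := by
  simp [rowF, List.findSome?_nil, h]

lemma rowF_pos (X Y i : Int) (h : 50 + 60 * i < X ∧ X < 100 + 60 * i) : rowF X Y i = colF Y i := by
  simp [rowF, colF, List.findSome?_cons, List.findSome?_nil, h.1, h.2]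

lemma colF_eq (Y i : Int) (hy1 : 50 ≤ Y) (hy2 : Y ≤ 340) :
    colF Y i = if 0 < (Y - 50) % 60 ∧ (Y - 50) % 60 < 50 then some [i, (Y - 50) / 60] else none := by
  unfold colF
  simp only [List.findSome?_cons, List.findSome?_nil]
  split_ifs <;> first | omega | (simp_all; omega) | simp_all

lemma outer_eq (X Y : Int) (hx1 : 50 ≤ X) (hx2 : X ≤ 340) (hy1 : 50 ≤ Y) (hy2 : Y ≤ 340) :
    (([0, 1, 2, 3, 4] : List Int).findSome? (fun i => rowF X Y i)) =
      if (0 < (X - 50) % 60 ∧ (X - 50) % 60 < 50) ∧ (0 < (Y - 50) % 60 ∧ (Y - 50) % 60 < 50)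
      then some [(X - 50) / 60, (Y - 50) / 60] else none := by
  by_cases hgx : 0 < (X - 50) % 60 ∧ (X - 50) % 60 < 50
  · rcases (show (X - 50) / 60 = 0 ∨ (X - 50) / 60 = 1 ∨ (X - 50) / 60 = 2 ∨ (X - 50) / 60 = 3 ∨
        (X - 50) / 60 = 4 by omega) with h | h | h | h | h
    · simp only [List.findSome?_cons, List.findSome?_nil,
        rowF_pos X Y 0 (by omega), rowF_neg X Y 1 (by omega), rowF_neg X Y 2 (by omega),
        rowF_neg X Y 3 (by omega), rowF_neg X Y 4 (by omega), colF_eq Y 0 hy1 hy2, h]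
      by_cases hgy : 0 < (Y - 50) % 60 ∧ (Y - 50) % 60 < 50 <;> simp [hgx, hgy]
    · simp only [List.findSome?_cons, List.findSome?_nil,
        rowF_neg X Y 0 (by omega), rowF_pos X Y 1 (by omega), rowF_neg X Y 2 (by omega),
        rowF_neg X Y 3 (by omega), rowF_neg X Y 4 (by omega), colF_eq Y 1 hy1 hy2, h]
      by_cases hgy : 0 < (Y - 50) % 60 ∧ (Y - 50) % 60 < 50 <;> simp [hgx, hgy]
    · simp only [List.findSome?_cons, List.findSome?_nil,
        rowF_neg X Y 0 (by omega), rowF_neg X Y 1 (by omega), rowF_pos X Y 2 (by omega),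
        rowF_neg X Y 3 (by omega), rowF_neg X Y 4 (by omega), colF_eq Y 2 hy1 hy2, h]
      by_cases hgy : 0 < (Y - 50) % 60 ∧ (Y - 50) % 60 < 50 <;> simp [hgx, hgy]
    · simp only [List.findSome?_cons, List.findSome?_nil,
        rowF_neg X Y 0 (by omega), rowF_neg X Y 1 (by omega), rowF_neg X Y 2 (by omega),
        rowF_pos X Y 3 (by omega), rowF_neg X Y 4 (by omega), colF_eq Y 3 hy1 hy2, h]
      by_cases hgy : 0 < (Y - 50) % 60 ∧ (Y - 50) % 60 < 50 <;> simp [hgx, hgy]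
    · simp only [List.findSome?_cons, List.findSome?_nil,
        rowF_neg X Y 0 (by omega), rowF_neg X Y 1 (by omega), rowF_neg X Y 2 (by omega),
        rowF_neg X Y 3 (by omega), rowF_pos X Y 4 (by omega), colF_eq Y 4 hy1 hy2, h]
      by_cases hgy : 0 < (Y - 50) % 60 ∧ (Y - 50) % 60 < 50 <;> simp [hgx, hgy]
  · simp only [List.findSome?_cons, List.findSome?_nil,
      rowF_neg X Y 0 (by omega), rowF_neg X Y 1 (by omega), rowF_neg X Y 2 (by omega),
      rowF_neg X Y 3 (by omega), rowF_neg X Y 4 (by omega)]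
    rw [if_neg (by tauto)]

-- ===== VERDICT (by name: the statement is the Claim_ definition above) =====
theorem pos_to_tile_spec : Claim_equal_pos_to_tile := by
  intro posX posY _
  unfold Spec_pos_to_tile pos_to_tile pos_to_tile_alt
  by_cases hx : posX < 50 ∨ 340 < posX
  · simp [hx]
  · by_cases hy : posY < 50 ∨ 340 < posY
    · simp [hx, hy]
    · simp only [if_neg hx, if_neg hy]
      rw [PySem.Int.floordiv_eq_ediv_of_pos (a := posX - 50) (by norm_num),
          PySem.Int.floordiv_eq_ediv_of_pos (a := posY - 50) (by norm_num),
          PySem.Int.mod_eq_emod_of_pos (a := posX - 50) (by norm_num),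
          PySem.Int.mod_eq_emod_of_pos (a := posY - 50) (by norm_num)]
      have hrange : PySem.List.pyRange 0 5 1 = [0, 1, 2, 3, 4] := by decide
      rw [hrange]
      rw [show (([0, 1, 2, 3, 4] : List Int).findSome? (fun i =>
          ([0, 1, 2, 3, 4] : List Int).findSome? (fun j =>
            if (50 + 60 * i < posX ∧ posX < 100 + 60 * i) ∧ (50 + 60 * j < posY ∧ posY < 100 + 60 * j)
            then some [i, j] else none))) =
          ([0, 1, 2, 3, 4] : List Int).findSome? (fun i => rowF posX posY i) from rfl]
      rw [outer_eq posX posY (by omega) (by omega) (by omega) (by omega)]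
      by_cases hg : (0 < (posX - 50) % 60 ∧ (posX - 50) % 60 < 50) ∧
          (0 < (posY - 50) % 60 ∧ (posY - 50) % 60 < 50) <;> simp [hg]
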